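-- pv_equiv track=rewrite | github.com/yennanliu/CS_basics | leetcode_python/Hash_table/sentence-similarity-ii.py | areSentencesSimilarTwo
-- ===== SOURCE A (Python) =====
-- import collections
-- import collections
--
-- def areSentencesSimilarTwo(words1, words2, pairs):
--     if len(words1) != len(words2): return False
--     similars = collections.defaultdict(set)
--     for w1, w2 in pairs:
--         similars[w1].add(w2)
--         similars[w2].add(w1)
--     ### NOTICE HERE : use DFS to check if 2 words is in the SAME "word cluster"
--     def dfs(words1, words2, visits):
--         for similar in similars[words2]:
--             if words1 == similar:
--                 return True
--             elif similar not in visits: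
--                 visits.add(similar)
--                 if dfs(words1, similar, visits):
--                     return True
--         return False
--
--     for w1, w2 in zip(words1, words2):
--         if w1 != w2 and not dfs(w1, w2, set([w2])):
--             return False
--     return True
-- ===== SOURCE B (Python) =====
-- def areSentencesSimilarTwo(words1, words2, pairs):
--     if len(words1) != len(words2):
--         return False
--     # Precompute equivalence classes once: map each word to a representative,
--     # merging classes by relabelling when a pair joins two existing classes.
--     comp = {}
--     for a, b in pairs:
--         ra, rb = comp.get(a), comp.get(b)
--         if ra is None and rb is None:
--             comp[a] = a
--             comp[b] = a
--         elif rb is None: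
--             comp[b] = ra
--         elif ra is None:
--             comp[a] = rb
--         elif ra != rb:
--             comp = {w: (ra if r == rb else r) for w, r in comp.items()}
--     return all(x == y or (x in comp and comp[x] == comp.get(y))
--                for x, y in zip(words1, words2))
-- ===== Notes on version B (the rewrite author's own statement) =====
-- stated objective: alternative
-- what changed: A answers each sentence position by a fresh DFS over an adjacency map of the synonym graph; B instead precomputes a word-to-representative table once (merging equivalence classes by relabelling as pairs are scanned) and then answers every position with two dictionary lookups.
import Mathlib
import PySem

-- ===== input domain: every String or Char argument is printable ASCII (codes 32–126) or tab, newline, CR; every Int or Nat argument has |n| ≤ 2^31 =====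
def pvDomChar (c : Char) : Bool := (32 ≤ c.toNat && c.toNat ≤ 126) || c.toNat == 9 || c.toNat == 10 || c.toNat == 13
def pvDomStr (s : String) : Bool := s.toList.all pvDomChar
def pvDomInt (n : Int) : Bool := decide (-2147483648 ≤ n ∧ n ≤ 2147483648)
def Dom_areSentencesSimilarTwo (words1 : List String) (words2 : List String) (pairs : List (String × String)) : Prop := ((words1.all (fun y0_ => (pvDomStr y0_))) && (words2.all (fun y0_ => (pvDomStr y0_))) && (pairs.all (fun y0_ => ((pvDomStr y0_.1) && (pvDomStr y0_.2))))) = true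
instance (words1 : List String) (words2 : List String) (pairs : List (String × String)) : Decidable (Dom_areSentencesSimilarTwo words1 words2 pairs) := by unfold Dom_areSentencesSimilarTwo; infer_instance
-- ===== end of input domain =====

-- B replaces A's per-position DFS over an adjacency map by one precomputed word→representative
-- table (classes merged by relabelling), so each position check is a pair of dictionary lookups.

-- ===== PORT A =====
-- similars[w1].add(w2); similars[w2].add(w1)  (defaultdict(set))
def simStep (d : PySem.Dict String (PySem.Set String)) (p : String × String) :
    PySem.Dict String (PySem.Set String) :=
  (d.modify p.1 PySem.Set.empty (fun s => PySem.Set.add s p.2)).modify p.2 PySem.Set.empty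
    (fun s => PySem.Set.add s p.1)

def buildSim (pairs : List (String × String)) : PySem.Dict String (PySem.Set String) :=
  pairs.foldl simStep PySem.Dict.empty

-- the recursive dfs: iterate over similars[words2] (a Python set; the Boolean result is
-- independent of that iteration order), threading the mutated `visits` set; `fuel` only
-- realises termination — with fuel ≥ #unvisited vertices (always true for the initial
-- 2*len(pairs)) the fuel-0 branch is never reached.
def dfsA (sim : PySem.Dict String (PySem.Set String)) (target : String) :
    Nat → List String → PySem.Set String → Bool × PySem.Set String
  | _, [], visits => (false, visits)
  | fuel, s :: rest, visits =>
    if target = s then (true, visits)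
    else if s ∈ visits then dfsA sim target fuel rest visits
    else
      match fuel with
      | 0 => (false, PySem.Set.add visits s)
      | fuel' + 1 =>
        let r := dfsA sim target fuel' (sim.getD s PySem.Set.empty) (PySem.Set.add visits s)
        if r.1 then r else dfsA sim target fuel' rest r.2
termination_by fuel l _ => (fuel, l.length)

def areSentencesSimilarTwo (words1 : List String) (words2 : List String)
    (pairs : List (String × String)) : Bool :=
  if words1.length ≠ words2.length then false
  else
    let sim := buildSim pairs
    (words1.zip words2).all (fun p =>
      p.1 == p.2 ||
        (dfsA sim p.1 (2 * pairs.length) (sim.getD p.2 PySem.Set.empty)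
          (PySem.Set.ofList [p.2])).1)

-- ===== PORT B =====
-- comp = {w: (ra if r == rb else r) for w, r in comp.items()}
def relabel (comp : PySem.Dict String String) (ra rb : String) : PySem.Dict String String :=
  PySem.Dict.mk (comp.items.map (fun q => (q.1, if q.2 = rb then ra else q.2)))

def stepB (comp : PySem.Dict String String) (p : String × String) : PySem.Dict String String :=
  match comp.get? p.1, comp.get? p.2 with
  | none, none => (comp.insert p.1 p.1).insert p.2 p.1
  | some ra, none => comp.insert p.2 ra
  | none, some rb => comp.insert p.1 rb
  | some ra, some rb => if ra ≠ rb then relabel comp ra rb else comp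

def areSentencesSimilarTwo_alt (words1 : List String) (words2 : List String)
    (pairs : List (String × String)) : Bool :=
  if words1.length ≠ words2.length then false
  else
    let comp := pairs.foldl stepB PySem.Dict.empty
    (words1.zip words2).all (fun p =>
      p.1 == p.2 ||
        (match comp.get? p.1 with
         | none => false
         | some rx => comp.get? p.2 == some rx))

-- ===== PRECONDITION & SPEC =====
def Spec_areSentencesSimilarTwo (words1 : List String) (words2 : List String) (pairs : List (String × String)) (out : Bool) : Prop := out = areSentencesSimilarTwo_alt words1 words2 pairs
instance (words1 : List String) (words2 : List String) (pairs : List (String × String)) (out : Bool) : Decidable (Spec_areSentencesSimilarTwo words1 words2 pairs out) := by unfold Spec_areSentencesSimilarTwo; infer_instance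

-- ===== CLAIM (what is proved, stated in full; the proofs are below) =====
def Claim_equal_areSentencesSimilarTwo : Prop := ∀ (words1 : List String) (words2 : List String) (pairs : List (String × String)), Dom_areSentencesSimilarTwo words1 words2 pairs → Spec_areSentencesSimilarTwo words1 words2 pairs (areSentencesSimilarTwo words1 words2 pairs)

-- ===== LEMMAS AND PROOFS =====

-- the (symmetric) similarity relation generated by `pairs`, and its reflexive-transitive closure
def SimRel (P : List (String × String)) (u v : String) : Prop := (u, v) ∈ P ∨ (v, u) ∈ P
def SimConn (P : List (String × String)) : String → String → Prop := Relation.ReflTransGen (SimRel P)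
def SimInV (P : List (String × String)) (x : String) : Prop := ∃ p ∈ P, x = p.1 ∨ x = p.2
def SimVf (P : List (String × String)) : Finset String := (P.map Prod.fst ++ P.map Prod.snd).toFinset

lemma simrel_symm {P : List (String × String)} {u v : String} (h : SimRel P u v) : SimRel P v u := h.symm

lemma simconn_symm {P : List (String × String)} {x y : String} (h : SimConn P x y) : SimConn P y x :=
  Relation.ReflTransGen.symmetric (fun _ _ h => simrel_symm h) h

lemma simrel_inV {P : List (String × String)} {u v : String} (h : SimRel P u v) : SimInV P u ∧ SimInV P v := by
  rcases h with h | h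
  · exact ⟨⟨_, h, Or.inl rfl⟩, ⟨_, h, Or.inr rfl⟩⟩
  · exact ⟨⟨_, h, Or.inr rfl⟩, ⟨_, h, Or.inl rfl⟩⟩

lemma simsimconn_inV_left {P : List (String × String)} {x y : String} (h : SimConn P x y) (hne : x ≠ y) :
    SimInV P x := by
  rcases Relation.ReflTransGen.cases_head h with rfl | ⟨c, hr, _⟩
  · exact absurd rfl hne
  · exact (simrel_inV hr).1

lemma simconn_inV {P : List (String × String)} {x y : String} (h : SimConn P x y) (hne : x ≠ y) :
    SimInV P x ∧ SimInV P y :=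
  ⟨simsimconn_inV_left h hne, simsimconn_inV_left (simconn_symm h) (Ne.symm hne)⟩

lemma simconn_of_not_inV {P : List (String × String)} {x y : String} (hx : ¬ SimInV P x)
    (h : SimConn P x y) : x = y := by
  by_contra hne; exact hx (simsimconn_inV_left h hne)

lemma siminV_mem_Vf {P : List (String × String)} {x : String} (h : SimInV P x) : x ∈ SimVf P := by
  rcases h with ⟨p, hp, rfl | rfl⟩ <;>
    simp only [SimVf, List.mem_toFinset, List.mem_append, List.mem_map]
  · exact Or.inl ⟨p, hp, rfl⟩
  · exact Or.inr ⟨p, hp, rfl⟩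

lemma simrel_append {P : List (String × String)} {a b u v : String} :
    SimRel (P ++ [(a, b)]) u v ↔ SimRel P u v ∨ (u = a ∧ v = b) ∨ (u = b ∧ v = a) := by
  simp [SimRel, List.mem_append, Prod.ext_iff]
  tauto

lemma simconn_mono {P : List (String × String)} {a b x y : String} (h : SimConn P x y) :
    SimConn (P ++ [(a, b)]) x y :=
  Relation.ReflTransGen.mono (fun _ _ hr => simrel_append.2 (Or.inl hr)) h

lemma simconn_append {P : List (String × String)} {a b x y : String} :
    SimConn (P ++ [(a, b)]) x y ↔
      SimConn P x y ∨ (SimConn P x a ∧ SimConn P b y) ∨ (SimConn P x b ∧ SimConn P a y) := by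
  constructor
  · intro h
    induction h with
    | refl => exact Or.inl .refl
    | tail _ hr ih =>
      rcases simrel_append.1 hr with hp | ⟨rfl, rfl⟩ | ⟨rfl, rfl⟩
      · rcases ih with h | ⟨h1, h2⟩ | ⟨h1, h2⟩
        · exact Or.inl (h.tail hp)
        · exact Or.inr (Or.inl ⟨h1, h2.tail hp⟩)
        · exact Or.inr (Or.inr ⟨h1, h2.tail hp⟩)
      · rcases ih with h | ⟨h1, h2⟩ | ⟨h1, h2⟩
        · exact Or.inr (Or.inl ⟨h, .refl⟩)
        · exact Or.inr (Or.inl ⟨h1, .refl⟩)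
        · exact Or.inl h1
      · rcases ih with h | ⟨h1, h2⟩ | ⟨h1, h2⟩
        · exact Or.inr (Or.inr ⟨h, .refl⟩)
        · exact Or.inl h1
        · exact Or.inr (Or.inr ⟨h1, .refl⟩)
  · rintro (h | ⟨h1, h2⟩ | ⟨h1, h2⟩)
    · exact simconn_mono h
    · exact ((simconn_mono h1).tail
        (simrel_append.2 (Or.inr (Or.inl ⟨rfl, rfl⟩)))).trans (simconn_mono h2)
    · exact ((simconn_mono h1).tail
        (simrel_append.2 (Or.inr (Or.inr ⟨rfl, rfl⟩)))).trans (simconn_mono h2)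

-- ===== A-side: adjacency characterisation =====
lemma mem_foldl_simStep (P : List (String × String)) :
    ∀ (d : PySem.Dict String (PySem.Set String)) (v x : String),
      x ∈ (P.foldl simStep d).getD v PySem.Set.empty ↔
        x ∈ d.getD v PySem.Set.empty ∨ SimRel P v x := by
  induction P with
  | nil => simp [SimRel]
  | cons p Q ih =>
    intro d v x
    rw [List.foldl_cons, ih]
    have h1 : x ∈ (simStep d p).getD v PySem.Set.empty ↔
        x ∈ d.getD v PySem.Set.empty ∨ (v = p.1 ∧ x = p.2) ∨ (v = p.2 ∧ x = p.1) := by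
      simp only [simStep, PySem.Dict.getD_modify]
      by_cases hp : p.1 = p.2 <;> by_cases h1 : v = p.1 <;> by_cases h2 : v = p.2 <;>
        simp_all [PySem.Set.mem_add]
    rw [h1]
    have h2 : SimRel (p :: Q) v x ↔ ((v = p.1 ∧ x = p.2) ∨ (v = p.2 ∧ x = p.1)) ∨ SimRel Q v x := by
      simp only [SimRel, List.mem_cons, Prod.ext_iff]
      tauto
    rw [h2]
    tauto

lemma mem_buildSim {P : List (String × String)} {v x : String} :
    x ∈ (buildSim P).getD v PySem.Set.empty ↔ SimRel P v x := by
  rw [buildSim, mem_foldl_simStep]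
  simp [PySem.Dict.getD_empty]

-- ===== A-side: DFS soundness and (on false) exhaustiveness =====
lemma toFinset_add (s : PySem.Set String) (x : String) :
    (PySem.Set.add s x).toFinset = insert x s.toFinset := by
  rw [PySem.Set.add_eq_ite]
  split
  · rw [Finset.insert_eq_self.2 (List.mem_toFinset.2 (by assumption))]
  · simp [List.toFinset_append]

lemma dfs_sound {P : List (String × String)} (sim : PySem.Dict String (PySem.Set String))
    (hsim : ∀ v y, y ∈ sim.getD v PySem.Set.empty → SimRel P v y) (target root : String)
    (fuel : Nat) (nbrs : List String) (visits : PySem.Set String)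
    (hn : ∀ y ∈ nbrs, SimConn P root y) (hv : ∀ y ∈ visits, SimConn P root y) :
    ((dfsA sim target fuel nbrs visits).1 = true → SimConn P root target) ∧
      (∀ y ∈ (dfsA sim target fuel nbrs visits).2, SimConn P root y) := by
  revert hn hv
  fun_induction dfsA sim target fuel nbrs visits
  case case1 =>
    rename_i visits
    exact fun _ hv => ⟨by simp, hv⟩
  case case2 =>
    rename_i fuel rest visits
    exact fun hn hv => ⟨fun _ => hn target List.mem_cons_self, hv⟩
  case case3 =>
    rename_i fuel s rest visits hne hmem ih
    exact fun hn hv => ih (fun y hy => hn y (List.mem_cons_of_mem _ hy)) hv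
  case case4 =>
    rename_i s rest visits hne hmem
    intro hn hv
    refine ⟨by simp, fun y hy => ?_⟩
    rcases (PySem.Set.mem_add _ _ _).1 hy with h | rfl
    · exact hv y h
    · exact hn y List.mem_cons_self
  case case5 =>
    rename_i s rest visits hne hmem fuel' r hr ih
    intro hn hv
    have hs : SimConn P root s := hn s List.mem_cons_self
    exact ih (fun y hy => hs.tail (hsim s y hy))
      (fun y hy => ((PySem.Set.mem_add _ _ _).1 hy).elim (hv y) (fun h => h ▸ hs))
  case case6 =>
    rename_i s rest visits hne hmem fuel' r hr ih2 ih1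
    intro hn hv
    have hs : SimConn P root s := hn s List.mem_cons_self
    have h2 := ih2 (fun y hy => hs.tail (hsim s y hy))
      (fun y hy => ((PySem.Set.mem_add _ _ _).1 hy).elim (hv y) (fun h => h ▸ hs))
    exact ih1 (fun y hy => hn y (List.mem_cons_of_mem _ hy)) h2.2

lemma dfs_false {P : List (String × String)} (sim : PySem.Dict String (PySem.Set String))
    (hsim : ∀ v y, y ∈ sim.getD v PySem.Set.empty → y ∈ SimVf P) (target : String)
    (fuel : Nat) (nbrs : List String) (visits : PySem.Set String)
    (hn : ∀ y ∈ nbrs, y ∈ SimVf P) (hf : (SimVf P \ visits.toFinset).card ≤ fuel)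
    (hres : (dfsA sim target fuel nbrs visits).1 = false) :
    (∀ y ∈ visits, y ∈ (dfsA sim target fuel nbrs visits).2) ∧
      (∀ y ∈ nbrs, y ∈ (dfsA sim target fuel nbrs visits).2 ∧ y ≠ target) ∧
      (∀ v ∈ (dfsA sim target fuel nbrs visits).2, v ∉ visits → v ≠ target ∧
        ∀ y ∈ sim.getD v PySem.Set.empty, y ∈ (dfsA sim target fuel nbrs visits).2 ∧ y ≠ target) := by
  revert hn hf hres
  fun_induction dfsA sim target fuel nbrs visits
  case case1 =>
    rename_i visits
    intro _ _ _
    exact ⟨fun y hy => hy, by simp, fun v hv hv' => absurd hv hv'⟩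
  case case2 => intro _ _ hres; simp at hres
  case case3 =>
    rename_i fuel s rest visits hne hmem ih
    intro hn hf hres
    obtain ⟨a2, b2, c2⟩ := ih (fun y hy => hn y (List.mem_cons_of_mem _ hy)) hf hres
    refine ⟨a2, fun y hy => ?_, c2⟩
    rcases List.mem_cons.1 hy with rfl | hy
    · exact ⟨a2 y hmem, fun h => hne h.symm⟩
    · exact b2 y hy
  case case4 =>
    rename_i s rest visits hne hmem
    intro hn hf
    exfalso
    have hs : s ∈ SimVf P \ visits.toFinset :=
      Finset.mem_sdiff.2 ⟨hn s List.mem_cons_self, fun h => hmem (List.mem_toFinset.1 h)⟩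
    have := Finset.card_pos.2 ⟨s, hs⟩
    omega
  case case5 =>
    rename_i s rest visits hne hmem fuel' r hr ih
    intro _ _ hres
    rw [hres] at hr
    exact absurd hr Bool.false_ne_true
  case case6 =>
    rename_i s rest visits hne hmem fuel' r hr ih2 ih1
    intro hn hf hres
    have hsVf : s ∈ SimVf P := hn s List.mem_cons_self
    have hcard : (SimVf P \ (PySem.Set.add visits s).toFinset).card ≤ fuel' := by
      rw [toFinset_add, Finset.sdiff_insert]
      have hs : s ∈ SimVf P \ visits.toFinset :=
        Finset.mem_sdiff.2 ⟨hsVf, fun h => hmem (List.mem_toFinset.1 h)⟩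
      have := Finset.card_erase_of_mem hs
      omega
    obtain ⟨a1, b1, c1⟩ := ih2 (fun y hy => hsim s y hy) hcard (Bool.eq_false_iff.2 hr)
    have hcard2 : (SimVf P \ r.2.toFinset).card ≤ fuel' := by
      refine le_trans (Finset.card_le_card (Finset.sdiff_subset_sdiff (Finset.Subset.refl _) ?_)) hcard
      intro y hy
      exact List.mem_toFinset.2 (a1 y (List.mem_toFinset.1 hy))
    obtain ⟨a2, b2, c2⟩ := ih1 (fun y hy => hn y (List.mem_cons_of_mem _ hy)) hcard2 hres
    have lift : ∀ y, y ∈ r.2 → y ∈ (dfsA sim target fuel' rest r.2).2 := a2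
    have hsin : s ∈ (dfsA sim target fuel' rest r.2).2 :=
      lift s (a1 s ((PySem.Set.mem_add _ _ _).2 (Or.inr rfl)))
    refine ⟨fun y hy => lift y (a1 y ((PySem.Set.mem_add _ _ _).2 (Or.inl hy))), ?_, ?_⟩
    · intro y hy
      rcases List.mem_cons.1 hy with rfl | hy
      · exact ⟨hsin, fun h => hne h.symm⟩
      · exact b2 y hy
    · intro v hvF hvnot
      by_cases hv2 : v ∈ r.2
      · by_cases hvs : v ∈ PySem.Set.add visits s
        · have hveq : v = s := by
            rcases (PySem.Set.mem_add _ _ _).1 hvs with h | h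
            · exact absurd h hvnot
            · exact h
          subst hveq
          refine ⟨fun h => hne h.symm, fun y hy => ?_⟩
          obtain ⟨hyr, hyt⟩ := b1 y hy
          exact ⟨lift y hyr, hyt⟩
        · obtain ⟨hvt, hnb⟩ := c1 v hv2 hvs
          exact ⟨hvt, fun y hy => ⟨lift y (hnb y hy).1, (hnb y hy).2⟩⟩
      · exact c2 v hvF hv2

-- the top-level dfs call decides connectivity
lemma dfs_iff_conn {P : List (String × String)} {x y : String} (hne : x ≠ y) :
    (dfsA (buildSim P) x (2 * P.length) ((buildSim P).getD y PySem.Set.empty)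
      (PySem.Set.ofList [y])).1 = true ↔ SimConn P y x := by
  have hsim1 : ∀ v z, z ∈ (buildSim P).getD v PySem.Set.empty → SimRel P v z :=
    fun v z hz => mem_buildSim.1 hz
  have hsim2 : ∀ v z, z ∈ (buildSim P).getD v PySem.Set.empty → z ∈ SimVf P :=
    fun v z hz => siminV_mem_Vf (simrel_inV (mem_buildSim.1 hz)).2
  have hyv : y ∈ PySem.Set.ofList [y] := (PySem.Set.mem_ofList _ _).2 (List.mem_singleton.2 rfl)
  constructor
  · intro h
    exact (dfs_sound (buildSim P) hsim1 x y _ _ _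
      (fun z hz => Relation.ReflTransGen.single (hsim1 y z hz))
      (fun z hz => by
        have : z = y := List.mem_singleton.1 ((PySem.Set.mem_ofList _ _).1 hz)
        exact this ▸ Relation.ReflTransGen.refl)).1 h
  · intro hconn
    by_contra h
    have hres : (dfsA (buildSim P) x (2 * P.length) ((buildSim P).getD y PySem.Set.empty)
        (PySem.Set.ofList [y])).1 = false := Bool.eq_false_iff.2 h
    have hf : (SimVf P \ (PySem.Set.ofList [y]).toFinset).card ≤ 2 * P.length := by
      calc (SimVf P \ (PySem.Set.ofList [y]).toFinset).card
          ≤ (SimVf P).card := Finset.card_le_card (Finset.sdiff_subset)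
        _ ≤ (P.map Prod.fst ++ P.map Prod.snd).length := List.toFinset_card_le _
        _ = 2 * P.length := by simp [List.length_append]; ring
    obtain ⟨ha, hb, hc⟩ := dfs_false (buildSim P) hsim2 x _ _ _ (fun z hz => hsim2 y z hz) hf hres
    set out := (dfsA (buildSim P) x (2 * P.length) ((buildSim P).getD y PySem.Set.empty)
        (PySem.Set.ofList [y])).2 with hout
    have hyout : y ∈ out := ha y hyv
    have closure : ∀ z, SimConn P y z → z ∈ out := by
      intro z hz
      induction hz with
      | refl => exact hyout
      | tail hstep hr ih =>
        rename_i m z'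
        by_cases hm : m ∈ PySem.Set.ofList [y]
        · have hmy : m = y := List.mem_singleton.1 ((PySem.Set.mem_ofList _ _).1 hm)
          exact (hb z' (mem_buildSim.2 (hmy ▸ hr))).1
        · exact ((hc m ih hm).2 z' (mem_buildSim.2 hr)).1
    have hxout : x ∈ out := closure x hconn
    by_cases hxv : x ∈ PySem.Set.ofList [y]
    · exact hne (List.mem_singleton.1 ((PySem.Set.mem_ofList _ _).1 hxv))
    · exact (hc x hxout hxv).1 rfl

lemma siminV_append {P : List (String × String)} {a b z : String} :
    SimInV (P ++ [(a, b)]) z ↔ SimInV P z ∨ z = a ∨ z = b := by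
  constructor
  · rintro ⟨p, hp, hz⟩
    rcases List.mem_append.1 hp with hp | hp
    · exact Or.inl ⟨p, hp, hz⟩
    · rw [List.mem_singleton.1 hp] at hz
      rcases hz with rfl | rfl
      · exact Or.inr (Or.inl rfl)
      · exact Or.inr (Or.inr rfl)
  · rintro (⟨p, hp, hz⟩ | rfl | rfl)
    · exact ⟨p, List.mem_append_left _ hp, hz⟩
    · exact ⟨(z, b), List.mem_append_right _ (List.mem_singleton.2 rfl), Or.inl rfl⟩
    · exact ⟨(a, z), List.mem_append_right _ (List.mem_singleton.2 rfl), Or.inr rfl⟩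

-- ===== B-side: the representative table realises the same equivalence =====
def SimInvB (P : List (String × String)) (c : PySem.Dict String String) : Prop :=
  (∀ x r, c.get? x = some r → c.get? r = some r) ∧
  (∀ x y, (∃ r, c.get? x = some r ∧ c.get? y = some r) ↔ (SimInV P x ∧ SimInV P y ∧ SimConn P x y))

lemma get?_relabel (c : PySem.Dict String String) (ra rb x : String) :
    (relabel c ra rb).get? x = (c.get? x).map (fun r => if r = rb then ra else r) := by
  rcases c with ⟨l⟩
  induction l with
  | nil => rfl
  | cons q rest ih =>
    rcases q with ⟨k, w⟩
    simp only [relabel, List.map_cons, PySem.Dict.get?_mk_cons] at *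
    split
    · rfl
    · exact ih

lemma siminvB_step {P : List (String × String)} {c : PySem.Dict String String} (h : SimInvB P c)
    (a b : String) : SimInvB (P ++ [(a, b)]) (stepB c (a, b)) := by
  obtain ⟨h1, h2⟩ := h
  have hInVget : ∀ x r, c.get? x = some r → SimInV P x := fun x r hx => ((h2 x x).1 ⟨r, hx, hx⟩).1
  have hsome : ∀ x, SimInV P x → ∃ r, c.get? x = some r := by
    intro x hx
    rcases (h2 x x).2 ⟨hx, hx, .refl⟩ with ⟨r, hr, -⟩
    exact ⟨r, hr⟩
  have hnone : ∀ x, c.get? x = none → ¬ SimInV P x := by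
    intro x hx hInV
    rcases hsome x hInV with ⟨r, hr⟩
    rw [hx] at hr; cases hr
  rcases hca : c.get? a with _ | ra <;> rcases hcb : c.get? b with _ | rb
  -- ===== case none/none: a and b both fresh =====
  · have hc' : stepB c (a, b) = (c.insert a a).insert b a := by simp [stepB, hca, hcb]
    rw [hc']
    have hna : ¬ SimInV P a := hnone a hca
    have hnb : ¬ SimInV P b := hnone b hcb
    have hval : ∀ x r, c.get? x = some r → r ≠ a ∧ r ≠ b := fun x r hx =>
      ⟨fun e => hna (e ▸ hInVget r r (h1 x r hx)), fun e => hnb (e ▸ hInVget r r (h1 x r hx))⟩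
    have hg : ∀ z, ((c.insert a a).insert b a).get? z =
        if z = b ∨ z = a then some a else c.get? z := by
      intro z
      rw [PySem.Dict.get?_insert, PySem.Dict.get?_insert]
      by_cases hzb : z = b <;> by_cases hza : z = a <;> simp [hzb, hza]
    constructor
    · intro x r hx
      rw [hg] at hx
      rw [hg]
      split at hx
      · cases hx; simp
      · obtain ⟨h3, h4⟩ := hval x r hx
        rw [if_neg (by tauto)]
        exact h1 x r hx
    · intro x y
      by_cases hx2 : x = b ∨ x = a <;> by_cases hy2 : y = b ∨ y = a
      · refine iff_of_true ⟨a, by rw [hg, if_pos hx2], by rw [hg, if_pos hy2]⟩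
          ⟨siminV_append.2 (Or.inr hx2.symm), siminV_append.2 (Or.inr hy2.symm), ?_⟩
        have hedge : SimConn (P ++ [(a, b)]) a b :=
          Relation.ReflTransGen.single (simrel_append.2 (Or.inr (Or.inl ⟨rfl, rfl⟩)))
        rcases hx2 with rfl | rfl <;> rcases hy2 with rfl | rfl
        · exact .refl
        · exact simconn_symm hedge
        · exact hedge
        · exact .refl
      · refine iff_of_false ?_ ?_
        · rintro ⟨r, hxr, hyr⟩
          rw [hg, if_pos hx2] at hxr
          rw [hg, if_neg hy2] at hyr
          cases hxr
          exact (hval y a hyr).1 rfl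
        · rintro ⟨-, -, hconn'⟩
          rcases simconn_append.1 hconn' with hc | ⟨hc, hc2⟩ | ⟨hc, hc2⟩
          · rcases hx2 with rfl | rfl
            · exact hy2 (Or.inl (simconn_of_not_inV hnb hc).symm)
            · exact hy2 (Or.inr (simconn_of_not_inV hna hc).symm)
          · exact hy2 (Or.inl (simconn_of_not_inV hnb hc2).symm)
          · exact hy2 (Or.inr (simconn_of_not_inV hna hc2).symm)
      · refine iff_of_false ?_ ?_
        · rintro ⟨r, hxr, hyr⟩
          rw [hg, if_neg hx2] at hxr
          rw [hg, if_pos hy2] at hyr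
          cases hyr
          exact (hval x a hxr).1 rfl
        · rintro ⟨-, -, hconn'⟩
          have hconn'' := simconn_symm hconn'
          rcases simconn_append.1 hconn'' with hc | ⟨hc, hc2⟩ | ⟨hc, hc2⟩
          · rcases hy2 with rfl | rfl
            · exact hx2 (Or.inl (simconn_of_not_inV hnb hc).symm)
            · exact hx2 (Or.inr (simconn_of_not_inV hna hc).symm)
          · exact hx2 (Or.inl (simconn_of_not_inV hnb hc2).symm)
          · exact hx2 (Or.inr (simconn_of_not_inV hna hc2).symm)
      · rw [not_or] at hx2 hy2
        have e1 : ((c.insert a a).insert b a).get? x = c.get? x := by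
          rw [hg, if_neg (by tauto)]
        have e2 : ((c.insert a a).insert b a).get? y = c.get? y := by
          rw [hg, if_neg (by tauto)]
        rw [e1, e2, h2 x y]
        constructor
        · rintro ⟨hx, hy, hc⟩
          exact ⟨siminV_append.2 (Or.inl hx), siminV_append.2 (Or.inl hy), simconn_mono hc⟩
        · rintro ⟨hx', hy', hc'⟩
          have hx : SimInV P x := by
            rcases siminV_append.1 hx' with h | rfl | rfl
            · exact h
            · exact absurd rfl hx2.2
            · exact absurd rfl hx2.1
          have hy : SimInV P y := by
            rcases siminV_append.1 hy' with h | rfl | rfl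
            · exact h
            · exact absurd rfl hy2.2
            · exact absurd rfl hy2.1
          refine ⟨hx, hy, ?_⟩
          rcases simconn_append.1 hc' with hc | ⟨hc, -⟩ | ⟨hc, -⟩
          · exact hc
          · exact absurd (simconn_of_not_inV hna (simconn_symm hc)).symm hx2.2
          · exact absurd (simconn_of_not_inV hnb (simconn_symm hc)).symm hx2.1
  -- ===== case none/some: a fresh, b known =====
  · have hc' : stepB c (a, b) = c.insert a rb := by simp [stepB, hca, hcb]
    rw [hc']
    have hna : ¬ SimInV P a := hnone a hca
    have hIb : SimInV P b := hInVget b rb hcb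
    have hrb : c.get? rb = some rb := h1 b rb hcb
    have hIrb : SimInV P rb := hInVget rb rb hrb
    have hrb_ne : rb ≠ a := fun e => hna (e ▸ hIrb)
    have hg : ∀ z, (c.insert a rb).get? z = if z = a then some rb else c.get? z :=
      fun z => PySem.Dict.get?_insert c a z rb
    constructor
    · intro x r hx
      rw [hg] at hx
      rw [hg]
      split at hx
      · cases hx
        rw [if_neg hrb_ne]
        exact hrb
      · have hr_ne : r ≠ a := fun e => hna (e ▸ hInVget r r (h1 x r hx))
        rw [if_neg hr_ne]
        exact h1 x r hx
    · intro x y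
      by_cases hxa : a = x <;> by_cases hya : a = y
      · subst hxa; subst hya
        exact iff_of_true ⟨rb, by rw [hg, if_pos rfl], by rw [hg, if_pos rfl]⟩
          ⟨siminV_append.2 (Or.inr (Or.inl rfl)), siminV_append.2 (Or.inr (Or.inl rfl)), .refl⟩
      · subst hxa
        have hiff1 : (∃ r, (c.insert a rb).get? a = some r ∧ (c.insert a rb).get? y = some r) ↔
            c.get? y = some rb := by
          constructor
          · rintro ⟨r, hxr, hyr⟩
            rw [hg, if_pos rfl] at hxr
            cases hxr
            rw [hg, if_neg (fun e => hya e.symm)] at hyr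
            exact hyr
          · intro hy
            exact ⟨rb, by rw [hg, if_pos rfl], by rw [hg, if_neg (fun e => hya e.symm)]; exact hy⟩
        have hiff2 : c.get? y = some rb ↔ SimInV P y ∧ SimConn P b y := by
          constructor
          · intro hy
            obtain ⟨-, hIy, hcby⟩ := (h2 b y).1 ⟨rb, hcb, hy⟩
            exact ⟨hIy, hcby⟩
          · rintro ⟨hIy, hcby⟩
            obtain ⟨r, hbr, hyr⟩ := (h2 b y).2 ⟨hIb, hIy, hcby⟩
            rw [hcb] at hbr
            cases hbr
            exact hyr
        rw [hiff1, hiff2]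
        constructor
        · rintro ⟨hIy, hcby⟩
          refine ⟨siminV_append.2 (Or.inr (Or.inl rfl)), siminV_append.2 (Or.inl hIy), ?_⟩
          exact Relation.ReflTransGen.trans
            (Relation.ReflTransGen.single (simrel_append.2 (Or.inr (Or.inl ⟨rfl, rfl⟩))))
            (simconn_mono hcby)
        · rintro ⟨-, hy', hc'⟩
          have hIy : SimInV P y := by
            rcases siminV_append.1 hy' with h | rfl | rfl
            · exact h
            · exact absurd rfl hya
            · exact hIb
          refine ⟨hIy, ?_⟩
          rcases simconn_append.1 hc' with hc | ⟨hc, hc2⟩ | ⟨hc, hc2⟩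
          · exact absurd (simconn_of_not_inV hna hc) hya
          · exact hc2
          · exact False.elim (hna ((simconn_of_not_inV hna hc).symm ▸ hIb))
      · subst hya
        have hiff1 : (∃ r, (c.insert a rb).get? x = some r ∧ (c.insert a rb).get? a = some r) ↔
            c.get? x = some rb := by
          constructor
          · rintro ⟨r, hxr, hyr⟩
            rw [hg, if_pos rfl] at hyr
            cases hyr
            rw [hg, if_neg (fun e => hxa e.symm)] at hxr
            exact hxr
          · intro hx
            exact ⟨rb, by rw [hg, if_neg (fun e => hxa e.symm)]; exact hx, by rw [hg, if_pos rfl]⟩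
        have hiff2 : c.get? x = some rb ↔ SimInV P x ∧ SimConn P x b := by
          constructor
          · intro hx
            obtain ⟨hIx, -, hcxb⟩ := (h2 x b).1 ⟨rb, hx, hcb⟩
            exact ⟨hIx, hcxb⟩
          · rintro ⟨hIx, hcxb⟩
            obtain ⟨r, hxr, hbr⟩ := (h2 x b).2 ⟨hIx, hIb, hcxb⟩
            rw [hcb] at hbr
            cases hbr
            exact hxr
        rw [hiff1, hiff2]
        constructor
        · rintro ⟨hIx, hcxb⟩
          refine ⟨siminV_append.2 (Or.inl hIx), siminV_append.2 (Or.inr (Or.inl rfl)), ?_⟩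
          exact Relation.ReflTransGen.trans (simconn_mono hcxb)
            (Relation.ReflTransGen.single (simrel_append.2 (Or.inr (Or.inr ⟨rfl, rfl⟩))))
        · rintro ⟨hx', -, hc'⟩
          have hIx : SimInV P x := by
            rcases siminV_append.1 hx' with h | rfl | rfl
            · exact h
            · exact absurd rfl hxa
            · exact hIb
          refine ⟨hIx, ?_⟩
          rcases simconn_append.1 hc' with hc | ⟨hc, hc2⟩ | ⟨hc, hc2⟩
          · exact absurd (simconn_of_not_inV hna (simconn_symm hc)) hxa
          · exact absurd (simconn_of_not_inV hna (simconn_symm hc)) hxa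
          · exact hc
      · have e1 : (c.insert a rb).get? x = c.get? x := by rw [hg, if_neg (fun e => hxa e.symm)]
        have e2 : (c.insert a rb).get? y = c.get? y := by rw [hg, if_neg (fun e => hya e.symm)]
        rw [e1, e2, h2 x y]
        constructor
        · rintro ⟨hx, hy, hc⟩
          exact ⟨siminV_append.2 (Or.inl hx), siminV_append.2 (Or.inl hy), simconn_mono hc⟩
        · rintro ⟨hx', hy', hc'⟩
          have hIx : SimInV P x := by
            rcases siminV_append.1 hx' with h | rfl | rfl
            · exact h
            · exact absurd rfl hxa
            · exact hIb
          have hIy : SimInV P y := by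
            rcases siminV_append.1 hy' with h | rfl | rfl
            · exact h
            · exact absurd rfl hya
            · exact hIb
          refine ⟨hIx, hIy, ?_⟩
          rcases simconn_append.1 hc' with hc | ⟨hc, hc2⟩ | ⟨hc, hc2⟩
          · exact hc
          · exact absurd (simconn_of_not_inV hna (simconn_symm hc)) hxa
          · exact absurd (simconn_of_not_inV hna hc2) hya
  -- ===== case some/none: a known, b fresh =====
  · have hc' : stepB c (a, b) = c.insert b ra := by simp [stepB, hca, hcb]
    rw [hc']
    have hnb : ¬ SimInV P b := hnone b hcb
    have hIa : SimInV P a := hInVget a ra hca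
    have hra : c.get? ra = some ra := h1 a ra hca
    have hIra : SimInV P ra := hInVget ra ra hra
    have hra_ne : ra ≠ b := fun e => hnb (e ▸ hIra)
    have hg : ∀ z, (c.insert b ra).get? z = if z = b then some ra else c.get? z :=
      fun z => PySem.Dict.get?_insert c b z ra
    constructor
    · intro x r hx
      rw [hg] at hx
      rw [hg]
      split at hx
      · cases hx
        rw [if_neg hra_ne]
        exact hra
      · have hr_ne : r ≠ b := fun e => hnb (e ▸ hInVget r r (h1 x r hx))
        rw [if_neg hr_ne]
        exact h1 x r hx
    · intro x y
      by_cases hxb : b = x <;> by_cases hyb : b = y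
      · subst hxb; subst hyb
        exact iff_of_true ⟨ra, by rw [hg, if_pos rfl], by rw [hg, if_pos rfl]⟩
          ⟨siminV_append.2 (Or.inr (Or.inr rfl)), siminV_append.2 (Or.inr (Or.inr rfl)), .refl⟩
      · subst hxb
        have hiff1 : (∃ r, (c.insert b ra).get? b = some r ∧ (c.insert b ra).get? y = some r) ↔
            c.get? y = some ra := by
          constructor
          · rintro ⟨r, hxr, hyr⟩
            rw [hg, if_pos rfl] at hxr
            cases hxr
            rw [hg, if_neg (fun e => hyb e.symm)] at hyr
            exact hyr
          · intro hy
            exact ⟨ra, by rw [hg, if_pos rfl], by rw [hg, if_neg (fun e => hyb e.symm)]; exact hy⟩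
        have hiff2 : c.get? y = some ra ↔ SimInV P y ∧ SimConn P a y := by
          constructor
          · intro hy
            obtain ⟨-, hIy, hcay⟩ := (h2 a y).1 ⟨ra, hca, hy⟩
            exact ⟨hIy, hcay⟩
          · rintro ⟨hIy, hcay⟩
            obtain ⟨r, har, hyr⟩ := (h2 a y).2 ⟨hIa, hIy, hcay⟩
            rw [hca] at har
            cases har
            exact hyr
        rw [hiff1, hiff2]
        constructor
        · rintro ⟨hIy, hcay⟩
          refine ⟨siminV_append.2 (Or.inr (Or.inr rfl)), siminV_append.2 (Or.inl hIy), ?_⟩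
          exact Relation.ReflTransGen.trans
            (Relation.ReflTransGen.single (simrel_append.2 (Or.inr (Or.inr ⟨rfl, rfl⟩))))
            (simconn_mono hcay)
        · rintro ⟨-, hy', hc'⟩
          have hIy : SimInV P y := by
            rcases siminV_append.1 hy' with h | rfl | rfl
            · exact h
            · exact hIa
            · exact absurd rfl hyb
          refine ⟨hIy, ?_⟩
          rcases simconn_append.1 hc' with hc | ⟨hc, hc2⟩ | ⟨hc, hc2⟩
          · exact absurd (simconn_of_not_inV hnb hc) hyb
          · exact False.elim (hnb ((simconn_of_not_inV hnb hc).symm ▸ hIa))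
          · exact hc2
      · subst hyb
        have hiff1 : (∃ r, (c.insert b ra).get? x = some r ∧ (c.insert b ra).get? b = some r) ↔
            c.get? x = some ra := by
          constructor
          · rintro ⟨r, hxr, hyr⟩
            rw [hg, if_pos rfl] at hyr
            cases hyr
            rw [hg, if_neg (fun e => hxb e.symm)] at hxr
            exact hxr
          · intro hx
            exact ⟨ra, by rw [hg, if_neg (fun e => hxb e.symm)]; exact hx, by rw [hg, if_pos rfl]⟩
        have hiff2 : c.get? x = some ra ↔ SimInV P x ∧ SimConn P x a := by
          constructor
          · intro hx
            obtain ⟨hIx, -, hcxa⟩ := (h2 x a).1 ⟨ra, hx, hca⟩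
            exact ⟨hIx, hcxa⟩
          · rintro ⟨hIx, hcxa⟩
            obtain ⟨r, hxr, har⟩ := (h2 x a).2 ⟨hIx, hIa, hcxa⟩
            rw [hca] at har
            cases har
            exact hxr
        rw [hiff1, hiff2]
        constructor
        · rintro ⟨hIx, hcxa⟩
          refine ⟨siminV_append.2 (Or.inl hIx), siminV_append.2 (Or.inr (Or.inr rfl)), ?_⟩
          exact Relation.ReflTransGen.trans (simconn_mono hcxa)
            (Relation.ReflTransGen.single (simrel_append.2 (Or.inr (Or.inl ⟨rfl, rfl⟩))))
        · rintro ⟨hx', -, hc'⟩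
          have hIx : SimInV P x := by
            rcases siminV_append.1 hx' with h | rfl | rfl
            · exact h
            · exact hIa
            · exact absurd rfl hxb
          refine ⟨hIx, ?_⟩
          rcases simconn_append.1 hc' with hc | ⟨hc, hc2⟩ | ⟨hc, hc2⟩
          · exact absurd (simconn_of_not_inV hnb (simconn_symm hc)) hxb
          · exact hc
          · exact absurd (simconn_of_not_inV hnb (simconn_symm hc)) hxb
      · have e1 : (c.insert b ra).get? x = c.get? x := by rw [hg, if_neg (fun e => hxb e.symm)]
        have e2 : (c.insert b ra).get? y = c.get? y := by rw [hg, if_neg (fun e => hyb e.symm)]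
        rw [e1, e2, h2 x y]
        constructor
        · rintro ⟨hx, hy, hc⟩
          exact ⟨siminV_append.2 (Or.inl hx), siminV_append.2 (Or.inl hy), simconn_mono hc⟩
        · rintro ⟨hx', hy', hc'⟩
          have hIx : SimInV P x := by
            rcases siminV_append.1 hx' with h | rfl | rfl
            · exact h
            · exact hIa
            · exact absurd rfl hxb
          have hIy : SimInV P y := by
            rcases siminV_append.1 hy' with h | rfl | rfl
            · exact h
            · exact hIa
            · exact absurd rfl hyb
          refine ⟨hIx, hIy, ?_⟩
          rcases simconn_append.1 hc' with hc | ⟨hc, hc2⟩ | ⟨hc, hc2⟩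
          · exact hc
          · exact absurd (simconn_of_not_inV hnb hc2) hyb
          · exact absurd (simconn_of_not_inV hnb (simconn_symm hc)) hxb
  -- ===== case some/some =====
  · have hIa : SimInV P a := hInVget a ra hca
    have hIb : SimInV P b := hInVget b rb hcb
    by_cases hrab : ra = rb
    · have hc' : stepB c (a, b) = c := by simp [stepB, hca, hcb, hrab]
      rw [hc']
      have hab : SimConn P a b := ((h2 a b).1 ⟨ra, hca, hrab ▸ hcb⟩).2.2
      constructor
      · exact h1
      · intro x y
        rw [h2 x y]
        constructor
        · rintro ⟨hx, hy, hc⟩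
          exact ⟨siminV_append.2 (Or.inl hx), siminV_append.2 (Or.inl hy), simconn_mono hc⟩
        · rintro ⟨hx', hy', hc'⟩
          have hIx : SimInV P x := by
            rcases siminV_append.1 hx' with h | rfl | rfl
            · exact h
            · exact hIa
            · exact hIb
          have hIy : SimInV P y := by
            rcases siminV_append.1 hy' with h | rfl | rfl
            · exact h
            · exact hIa
            · exact hIb
          refine ⟨hIx, hIy, ?_⟩
          rcases simconn_append.1 hc' with hc | ⟨hc, hc2⟩ | ⟨hc, hc2⟩
          · exact hc
          · exact (hc.trans hab).trans hc2
          · exact (hc.trans (simconn_symm hab)).trans hc2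
    · have hc' : stepB c (a, b) = relabel c ra rb := by simp [stepB, hca, hcb, hrab]
      rw [hc']
      have hra : c.get? ra = some ra := h1 a ra hca
      have hrb : c.get? rb = some rb := h1 b rb hcb
      have hcommon : ∀ x y rx ry, c.get? x = some rx → c.get? y = some ry →
          SimConn P x y → rx = ry := by
        intro x y rx ry hgx hgy hc
        obtain ⟨r, hr1, hr2⟩ := (h2 x y).2 ⟨hInVget x rx hgx, hInVget y ry hgy, hc⟩
        rw [hgx] at hr1
        rw [hgy] at hr2
        cases hr1; cases hr2; rfl
      have hconn_of_rep : ∀ x y rx, c.get? x = some rx → c.get? y = some rx →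
          SimConn P x y := fun x y rx hgx hgy => ((h2 x y).1 ⟨rx, hgx, hgy⟩).2.2
      constructor
      · intro x r' hx
        rw [get?_relabel] at hx
        rw [get?_relabel]
        rcases hgx : c.get? x with _ | r
        · rw [hgx] at hx; cases hx
        · rw [hgx] at hx
          cases hx
          by_cases hrrb : r = rb
          · simp only [if_pos hrrb]
            rw [hra]
            simp
          · simp only [if_neg hrrb]
            rw [h1 x r hgx]
            simp [hrrb]
      · intro x y
        constructor
        · rintro ⟨r', hx, hy⟩
          rw [get?_relabel] at hx hy
          rcases hgx : c.get? x with _ | rx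
          · rw [hgx] at hx; simp at hx
          rcases hgy : c.get? y with _ | ry
          · rw [hgy] at hy; simp at hy
          rw [hgx] at hx
          rw [hgy] at hy
          simp only [Option.map_some] at hx hy
          have hfeq : (if rx = rb then ra else rx) = (if ry = rb then ra else ry) := by
            rw [Option.some.inj hx, Option.some.inj hy]
          have hIx : SimInV P x := hInVget x rx hgx
          have hIy : SimInV P y := hInVget y ry hgy
          refine ⟨siminV_append.2 (Or.inl hIx), siminV_append.2 (Or.inl hIy), ?_⟩
          have hcase : rx = ry ∨ (rx = ra ∧ ry = rb) ∨ (rx = rb ∧ ry = ra) := by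
            by_cases e1 : rx = rb <;> by_cases e2 : ry = rb
            · exact Or.inl (e1.trans e2.symm)
            · simp only [if_pos e1, if_neg e2] at hfeq
              exact Or.inr (Or.inr ⟨e1, hfeq.symm⟩)
            · simp only [if_neg e1, if_pos e2] at hfeq
              exact Or.inr (Or.inl ⟨hfeq, e2⟩)
            · simp only [if_neg e1, if_neg e2] at hfeq
              exact Or.inl hfeq
          rcases hcase with heq | ⟨ea, eb⟩ | ⟨eb, ea⟩
          · exact simconn_mono (hconn_of_rep x y rx hgx (by rw [heq]; exact hgy))
          · have hc1 : SimConn P x a := hconn_of_rep x a rx hgx (by rw [ea]; exact hca)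
            have hc2 : SimConn P b y := simconn_symm (hconn_of_rep y b ry hgy (by rw [eb]; exact hcb))
            exact simconn_append.2 (Or.inr (Or.inl ⟨hc1, hc2⟩))
          · have hc1 : SimConn P x b := hconn_of_rep x b rx hgx (by rw [eb]; exact hcb)
            have hc2 : SimConn P a y := simconn_symm (hconn_of_rep y a ry hgy (by rw [ea]; exact hca))
            exact simconn_append.2 (Or.inr (Or.inr ⟨hc1, hc2⟩))
        · rintro ⟨hx', hy', hc'⟩
          have hIx : SimInV P x := by
            rcases siminV_append.1 hx' with h | rfl | rfl
            · exact h
            · exact hIa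
            · exact hIb
          have hIy : SimInV P y := by
            rcases siminV_append.1 hy' with h | rfl | rfl
            · exact h
            · exact hIa
            · exact hIb
          obtain ⟨rx, hgx⟩ := hsome x hIx
          obtain ⟨ry, hgy⟩ := hsome y hIy
          have hfeq : (if rx = rb then ra else rx) = (if ry = rb then ra else ry) := by
            rcases simconn_append.1 hc' with hc | ⟨hc1, hc2⟩ | ⟨hc1, hc2⟩
            · rw [hcommon x y rx ry hgx hgy hc]
            · rw [hcommon x a rx ra hgx hca hc1,
                hcommon y b ry rb hgy hcb (simconn_symm hc2)]
              simp [hrab]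
            · rw [hcommon x b rx rb hgx hcb hc1,
                hcommon y a ry ra hgy hca (simconn_symm hc2)]
              simp [hrab]
          refine ⟨if rx = rb then ra else rx, ?_, ?_⟩
          · rw [get?_relabel, hgx]
            rfl
          · rw [get?_relabel, hgy]
            simp only [Option.map_some]
            rw [hfeq]

lemma siminvB_fold (P : List (String × String)) : SimInvB P (P.foldl stepB PySem.Dict.empty) := by
  induction P using List.reverseRecOn with
  | nil =>
    constructor
    · intro x r hx
      simp [PySem.Dict.get?_empty] at hx
    · intro x y
      constructor
      · rintro ⟨r, hr, -⟩
        exact absurd hr (by simp [PySem.Dict.get?_empty])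
      · rintro ⟨⟨p, hp, -⟩, -, -⟩
        exact absurd hp (List.not_mem_nil)
  | append_singleton Q p ih =>
    rw [List.foldl_append, List.foldl_cons, List.foldl_nil]
    exact siminvB_step ih p.1 p.2

-- ===== assembly =====
lemma pointwise (pairs : List (String × String)) (x y : String) :
    (x == y ||
      (dfsA (buildSim pairs) x (2 * pairs.length) ((buildSim pairs).getD y PySem.Set.empty)
        (PySem.Set.ofList [y])).1) =
    (x == y ||
      (match (pairs.foldl stepB PySem.Dict.empty).get? x with
       | none => false
       | some rx => (pairs.foldl stepB PySem.Dict.empty).get? y == some rx)) := by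
  by_cases hxy : x = y
  · simp [hxy]
  · have hbeq : (x == y) = false := by simp [hxy]
    rw [hbeq, Bool.false_or, Bool.false_or]
    obtain ⟨h1, h2⟩ := siminvB_fold pairs
    have hB : (match (pairs.foldl stepB PySem.Dict.empty).get? x with
        | none => false
        | some rx => (pairs.foldl stepB PySem.Dict.empty).get? y == some rx) = true ↔
        (∃ r, (pairs.foldl stepB PySem.Dict.empty).get? x = some r ∧
          (pairs.foldl stepB PySem.Dict.empty).get? y = some r) := by
      rcases hgx : (pairs.foldl stepB PySem.Dict.empty).get? x with _ | rx
      · simp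
      · simp only [beq_iff_eq]
        constructor
        · intro hy
          exact ⟨rx, rfl, hy⟩
        · rintro ⟨r, hr, hy⟩
          cases hr
          exact hy
    rw [Bool.eq_iff_iff, dfs_iff_conn hxy, hB, h2 x y]
    constructor
    · intro hc
      exact ⟨(simconn_inV (simconn_symm hc) hxy).1, (simconn_inV (simconn_symm hc) hxy).2,
        simconn_symm hc⟩
    · rintro ⟨-, -, hc⟩
      exact simconn_symm hc

-- ===== VERDICT (by name: the statement is the Claim_ definition above) =====
theorem areSentencesSimilarTwo_spec : Claim_equal_areSentencesSimilarTwo := by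
  intro words1 words2 pairs _
  unfold Spec_areSentencesSimilarTwo areSentencesSimilarTwo areSentencesSimilarTwo_alt
  by_cases h : words1.length ≠ words2.length
  · simp [h]
  · simp only [h, if_false]
    exact congrArg _ (funext (fun p => pointwise pairs p.1 p.2))
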